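-- pv_equiv track=rewrite | github.com/BurakAkten/GTUCourses | CSE321-Intro.-To-Algorithm-Design/HW2/findRottenWalnut[141044045].py | recursive_helper
-- ===== SOURCE A (Python) =====
-- def compareScales (leftScaleList, rightScaleList):
-- 	result = sum(leftScaleList) - sum(rightScaleList)
-- 	if result < 0:
-- 		return 1
-- 	elif result > 0:
-- 		return -1
-- 	else:
-- 		return 0
--
-- def recursive_helper(walnuts , size , index):
--
--
-- 	if(size == 1): #base condition
-- 		return index
--
-- 	middle = size//2	#middle index
--
-- 	if(size % 2 == 0):	#for the list that its size is even
--
-- 		#controlling if it is in the middle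
-- 		if(walnuts[middle] != walnuts[0] and walnuts[middle] != walnuts[-1]):
-- 			return index + middle
--
-- 		flag = compareScales(walnuts[0:middle] , walnuts[middle :])
-- 		if(flag < 0):
-- 			return recursive_helper(walnuts[middle :] , len(walnuts[middle :]) , index + middle)
-- 		elif(flag > 0):
-- 			return recursive_helper(walnuts[0:middle] , len(walnuts[0:middle]) , index)
-- 		else:
-- 			return -1
-- 	else:			#for the list that its size is odd
-- 		flag = compareScales(walnuts[0:middle] , walnuts[middle + 1 :])
-- 		if(flag < 0):
-- 			return recursive_helper(walnuts[middle + 1 :] , len(walnuts[middle + 1:]) , index + middle + 1)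
-- 		elif(flag > 0):
-- 			return recursive_helper(walnuts[0:middle] , len(walnuts[0:middle]) , index)
-- 		elif(walnuts[middle] != walnuts[0]):
-- 			return index + middle;
-- 		else:
-- 			return -1
-- ===== SOURCE B (Python) =====
-- def _search(ws, base):
--     # Find the odd-one-out in ws by iterative halving: precompute prefix sums
--     # once so every range-sum comparison is O(1), no slicing, no re-summing.
--     # Returns base + position, or -1 if the scales balance all the way down.
--     prefix = [0]
--     for w in ws:
--         prefix.append(prefix[-1] + w)
--     lo, hi = 0, len(ws)
--     while hi - lo > 1:
--         sz = hi - lo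
--         mid = lo + sz // 2
--         left = prefix[mid] - prefix[lo]
--         if sz % 2 == 0:
--             if ws[mid] != ws[lo] and ws[mid] != ws[hi - 1]:
--                 return base + mid
--             right = prefix[hi] - prefix[mid]
--             if left > right:
--                 lo = mid
--             elif left < right:
--                 hi = mid
--             else:
--                 return -1
--         else:
--             right = prefix[hi] - prefix[mid + 1]
--             if left > right:
--                 lo = mid + 1
--             elif left < right:
--                 hi = mid
--             elif ws[mid] != ws[lo]:
--                 return base + mid
--             else:
--                 return -1
--     return base + lo
--
--
-- def recursive_helper(walnuts, size, index):
--     # One first weighing as dictated by the caller-supplied size, then the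
--     # iterative prefix-sum search on whichever half the scales single out.
--     if size == 1:
--         return index
--     m = size // 2
--     if size % 2 == 0:
--         if walnuts[m] != walnuts[0] and walnuts[m] != walnuts[-1]:
--             return index + m
--         left, right = walnuts[:m], walnuts[m:]
--         if sum(left) > sum(right):
--             return _search(right, index + m)
--         elif sum(left) < sum(right):
--             return _search(left, index)
--         else:
--             return -1
--     else:
--         left, right = walnuts[:m], walnuts[m + 1:]
--         if sum(left) > sum(right):
--             return _search(right, index + m + 1)
--         elif sum(left) < sum(right):
--             return _search(left, index)
--         elif walnuts[m] != walnuts[0]: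
--             return index + m
--         else:
--             return -1
-- ===== Notes on version B (the rewrite author's own statement) =====
-- stated objective: alternative
-- what changed: After the one first weighing dictated by the caller-supplied size, B replaces A's slice-allocating recursion that re-sums both halves at every level with an iterative halving search over the chosen half using one precomputed prefix-sum array, so each range-sum comparison is O(1); Pre_ excludes exactly the inputs on which A raises IndexError (out-of-range first pivot, or a descent into an empty slice).
import Mathlib
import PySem

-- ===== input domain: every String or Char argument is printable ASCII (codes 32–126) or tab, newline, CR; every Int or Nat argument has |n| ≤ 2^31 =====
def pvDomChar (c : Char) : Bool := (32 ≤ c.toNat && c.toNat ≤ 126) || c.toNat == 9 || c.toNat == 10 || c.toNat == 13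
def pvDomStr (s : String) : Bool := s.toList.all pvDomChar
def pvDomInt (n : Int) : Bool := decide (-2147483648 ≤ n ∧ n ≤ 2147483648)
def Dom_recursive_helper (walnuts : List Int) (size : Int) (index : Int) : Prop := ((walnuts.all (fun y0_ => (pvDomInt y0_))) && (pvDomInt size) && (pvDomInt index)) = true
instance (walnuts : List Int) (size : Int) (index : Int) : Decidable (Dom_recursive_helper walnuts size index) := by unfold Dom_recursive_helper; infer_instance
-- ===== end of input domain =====

-- B keeps the first size-driven weighing and then finds the odd walnut with a precomputed
-- prefix-sum array and an iterative halving loop (O(1) range-sum comparisons, no slicing).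


-- ===== PORT A =====
def compareScales (leftScaleList rightScaleList : List Int) : Int :=
  let result := leftScaleList.sum - rightScaleList.sum
  if result < 0 then 1 else if result > 0 then -1 else 0

-- fuel only makes the recursion total; inside Pre_ each call strictly shrinks the list, so
-- walnuts.length + 1 steps are never exhausted
def recursive_helper_go (fuel : Nat) (walnuts : List Int) (size : Int) (index : Int) : Int :=
  match fuel with
  | 0 => 0
  | fuel + 1 =>
    if size = 1 then index
    else
      let middle := PySem.Int.floordiv size 2
      if PySem.Int.mod size 2 = 0 then
        if PySem.List.pyGetD walnuts middle 0 ≠ PySem.List.pyGetD walnuts 0 0 ∧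
           PySem.List.pyGetD walnuts middle 0 ≠ PySem.List.pyGetD walnuts (-1) 0 then
          index + middle
        else
          let flag := compareScales (PySem.List.slice walnuts (some 0) (some middle))
                                    (PySem.List.slice walnuts (some middle) none)
          if flag < 0 then
            recursive_helper_go fuel (PySem.List.slice walnuts (some middle) none)
              ((PySem.List.slice walnuts (some middle) none).length : Int) (index + middle)
          else if flag > 0 then
            recursive_helper_go fuel (PySem.List.slice walnuts (some 0) (some middle))
              ((PySem.List.slice walnuts (some 0) (some middle)).length : Int) index
          else -1
      else
        let flag := compareScales (PySem.List.slice walnuts (some 0) (some middle))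
                                  (PySem.List.slice walnuts (some (middle + 1)) none)
        if flag < 0 then
          recursive_helper_go fuel (PySem.List.slice walnuts (some (middle + 1)) none)
            ((PySem.List.slice walnuts (some (middle + 1)) none).length : Int) (index + middle + 1)
        else if flag > 0 then
          recursive_helper_go fuel (PySem.List.slice walnuts (some 0) (some middle))
            ((PySem.List.slice walnuts (some 0) (some middle)).length : Int) index
        else if PySem.List.pyGetD walnuts middle 0 ≠ PySem.List.pyGetD walnuts 0 0 then
          index + middle
        else -1

def recursive_helper (walnuts : List Int) (size : Int) (index : Int) : Int :=
  recursive_helper_go (walnuts.length + 1) walnuts size index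

-- ===== PORT B =====
-- Source B's prefix pass in _search: prefixFrom 0 ws = [0, ws0, ws0+ws1, …]
def prefixFrom (acc : Int) : List Int → List Int
  | [] => [acc]
  | x :: xs => acc :: prefixFrom (acc + x) xs

-- the while-loop of _search; fuel only makes it total (each iteration strictly shrinks hi - lo)
def altLoop (fuel : Nat) (ws pfx : List Int) (base : Int) (lo hi : Nat) : Int :=
  match fuel with
  | 0 => 0
  | fuel + 1 =>
    if hi - lo ≤ 1 then base + (lo : Int)
    else
      let sz := hi - lo
      let mid := lo + sz / 2
      let left := pfx.getD mid 0 - pfx.getD lo 0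
      if sz % 2 = 0 then
        if ws.getD mid 0 ≠ ws.getD lo 0 ∧ ws.getD mid 0 ≠ ws.getD (hi - 1) 0 then
          base + (mid : Int)
        else
          let right := pfx.getD hi 0 - pfx.getD mid 0
          if left > right then altLoop fuel ws pfx base mid hi
          else if left < right then altLoop fuel ws pfx base lo mid
          else -1
      else
        let right := pfx.getD hi 0 - pfx.getD (mid + 1) 0
        if left > right then altLoop fuel ws pfx base (mid + 1) hi
        else if left < right then altLoop fuel ws pfx base lo mid
        else if ws.getD mid 0 ≠ ws.getD lo 0 then base + (mid : Int)
        else -1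

-- Source B's _search: prefix sums once, then the halving loop over [0, len ws)
def search (ws : List Int) (base : Int) : Int :=
  altLoop (ws.length + 1) ws (prefixFrom 0 ws) base 0 ws.length

def recursive_helper_alt (walnuts : List Int) (size : Int) (index : Int) : Int :=
  if size = 1 then index
  else
    let m := PySem.Int.floordiv size 2
    if PySem.Int.mod size 2 = 0 then
      if PySem.List.pyGetD walnuts m 0 ≠ PySem.List.pyGetD walnuts 0 0 ∧
         PySem.List.pyGetD walnuts m 0 ≠ PySem.List.pyGetD walnuts (-1) 0 then
        index + m
      else
        let left := PySem.List.slice walnuts none (some m)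
        let right := PySem.List.slice walnuts (some m) none
        if left.sum > right.sum then search right (index + m)
        else if left.sum < right.sum then search left index
        else -1
    else
      let left := PySem.List.slice walnuts none (some m)
      let right := PySem.List.slice walnuts (some (m + 1)) none
      if left.sum > right.sum then search right (index + m + 1)
      else if left.sum < right.sum then search left index
      else if PySem.List.pyGetD walnuts m 0 ≠ PySem.List.pyGetD walnuts 0 0 then index + m
      else -1

-- ===== PRECONDITION & SPEC =====
-- Pre_ excludes exactly the inputs on which A raises IndexError: a first split whose pivot
-- walnuts[size//2] is out of range where A reads it, or whose comparison descends into an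
-- empty slice (the recursive call then indexes the empty list).
def Pre_recursive_helper (walnuts : List Int) (size : Int) (index : Int) : Prop :=
  size = 1 ∨
  (PySem.Int.mod size 2 = 0 ∧
    PySem.Raise.InRange walnuts.length (PySem.Int.floordiv size 2) ∧
    (¬ (PySem.List.pyGetD walnuts (PySem.Int.floordiv size 2) 0 ≠ PySem.List.pyGetD walnuts 0 0 ∧
        PySem.List.pyGetD walnuts (PySem.Int.floordiv size 2) 0 ≠ PySem.List.pyGetD walnuts (-1) 0) →
      (PySem.List.slice walnuts none (some (PySem.Int.floordiv size 2))).sum <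
        (PySem.List.slice walnuts (some (PySem.Int.floordiv size 2)) none).sum →
      1 ≤ (PySem.List.slice walnuts none (some (PySem.Int.floordiv size 2))).length)) ∨
  (PySem.Int.mod size 2 ≠ 0 ∧ size ≠ 1 ∧
    ((PySem.List.slice walnuts (some (PySem.Int.floordiv size 2 + 1)) none).sum <
        (PySem.List.slice walnuts none (some (PySem.Int.floordiv size 2))).sum →
      (PySem.List.slice walnuts (some (PySem.Int.floordiv size 2 + 1)) none) ≠ []) ∧
    ((PySem.List.slice walnuts none (some (PySem.Int.floordiv size 2))).sum <
        (PySem.List.slice walnuts (some (PySem.Int.floordiv size 2 + 1)) none).sum →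
      1 ≤ (PySem.List.slice walnuts none (some (PySem.Int.floordiv size 2))).length) ∧
    ((PySem.List.slice walnuts none (some (PySem.Int.floordiv size 2))).sum =
        (PySem.List.slice walnuts (some (PySem.Int.floordiv size 2 + 1)) none).sum →
      PySem.Raise.InRange walnuts.length (PySem.Int.floordiv size 2)))
instance (walnuts : List Int) (size : Int) (index : Int) : Decidable (Pre_recursive_helper walnuts size index) := by unfold Pre_recursive_helper; infer_instance

def pvWitness_recursive_helper : List Int × Int × Int := ([3, 3, 1, 3], 4, 0)

def Spec_recursive_helper (walnuts : List Int) (size : Int) (index : Int) (out : Int) : Prop := out = recursive_helper_alt walnuts size index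
instance (walnuts : List Int) (size : Int) (index : Int) (out : Int) : Decidable (Spec_recursive_helper walnuts size index out) := by unfold Spec_recursive_helper; infer_instance

-- ===== CLAIM (what is proved, stated in full; the proofs are below) =====
def Claim_equal_recursive_helper : Prop := ∀ (walnuts : List Int) (size : Int) (index : Int), Dom_recursive_helper walnuts size index → Pre_recursive_helper walnuts size index → Spec_recursive_helper walnuts size index (recursive_helper walnuts size index)

-- ===== LEMMAS AND PROOFS =====

theorem prefixFrom_getD (ws : List Int) : ∀ (acc : Int) (i : Nat), i ≤ ws.length →
    (prefixFrom acc ws).getD i 0 = acc + (ws.take i).sum := by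
  induction ws with
  | nil =>
    intro acc i hi
    have : i = 0 := by simpa using hi
    subst this; simp [prefixFrom]
  | cons x xs ih =>
    intro acc i hi
    cases i with
    | zero => simp [prefixFrom]
    | succ j =>
      simp only [prefixFrom, List.getD_cons_succ, List.take_succ_cons, List.sum_cons]
      rw [ih (acc + x) j (by simpa using hi)]; ring

theorem prefix_range_sum (ws : List Int) (a k : Nat) (h : a + k ≤ ws.length) :
    ((ws.drop a).take k).sum =
      (prefixFrom 0 ws).getD (a + k) 0 - (prefixFrom 0 ws).getD a 0 := by
  rw [prefixFrom_getD ws 0 (a + k) h, prefixFrom_getD ws 0 a (by omega)]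
  have : ws.take (a + k) = ws.take a ++ (ws.drop a).take k := by
    rw [← List.take_add]
  rw [this, List.sum_append]; ring

theorem sub_getD (ws : List Int) (lo hi k : Nat) (hk : k < hi - lo) (hhi : hi ≤ ws.length) :
    ((ws.drop lo).take (hi - lo)).getD k 0 = ws.getD (lo + k) 0 := by
  have h1 : ((ws.drop lo).take (hi - lo))[k]? = (ws.drop lo)[k]? := List.getElem?_take_of_lt hk
  have h2 : (ws.drop lo)[k]? = ws[lo + k]? := List.getElem?_drop ..
  simp [List.getD, h1, h2]

-- the flag of compareScales, read as a sign test on the difference of the sums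
theorem flag_lt_iff (X : Int) :
    ((if X < 0 then (1 : Int) else if X > 0 then -1 else 0) < 0) ↔ 0 < X := by
  split_ifs <;> omega

theorem flag_gt_iff (X : Int) :
    ((if X < 0 then (1 : Int) else if X > 0 then -1 else 0) > 0) ↔ X < 0 := by
  split_ifs <;> omega

-- the bridge: A's recursion on the slice ws[lo:hi] (with the true size) equals B's loop on (lo, hi)
theorem bridge (ws : List Int) (index : Int) : ∀ (fuel : Nat) (lo hi : Nat),
    lo < hi → hi ≤ ws.length →
    recursive_helper_go fuel ((ws.drop lo).take (hi - lo)) ((hi - lo : Nat) : Int) (index + (lo : Int))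
      = altLoop fuel ws (prefixFrom 0 ws) index lo hi := by
  intro fuel
  induction fuel with
  | zero => intro lo hi _ _; rfl
  | succ fuel ih =>
    intro lo hi hlohi hhi
    have hsublen : ((ws.drop lo).take (hi - lo)).length = hi - lo := by
      simp [List.length_take, List.length_drop]; omega
    by_cases hone : hi - lo = 1
    · simp only [recursive_helper_go, altLoop, hone]
      norm_num
    · have hm2 : 2 ≤ hi - lo := by omega
      have hsz1 : ((hi - lo : Nat) : Int) ≠ 1 := by
        intro h; exact hone (by exact_mod_cast h)
      have hfd : PySem.Int.floordiv ((hi - lo : Nat) : Int) 2 = (((hi - lo) / 2 : Nat) : Int) := by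
        exact_mod_cast PySem.Int.floordiv_natCast (hi - lo) 2
      have hmod : PySem.Int.mod ((hi - lo : Nat) : Int) 2 = (((hi - lo) % 2 : Nat) : Int) := by
        exact_mod_cast PySem.Int.mod_natCast (hi - lo) 2
      have hg_mid : PySem.List.pyGetD ((ws.drop lo).take (hi - lo)) (((hi - lo) / 2 : Nat) : Int) 0
          = ws.getD (lo + (hi - lo) / 2) 0 := by
        rw [PySem.List.pyGetD_natCast]
        exact sub_getD ws lo hi ((hi - lo) / 2) (by omega) hhi
      have hg0 : PySem.List.pyGetD ((ws.drop lo).take (hi - lo)) 0 0 = ws.getD lo 0 := by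
        have h := sub_getD ws lo hi 0 (by omega) hhi
        rw [PySem.List.pyGetD_zero]
        simpa [List.getD] using h
      have hsubne : (ws.drop lo).take (hi - lo) ≠ [] := by
        intro h
        rw [h] at hsublen
        simp at hsublen
        omega
      have hglast : PySem.List.pyGetD ((ws.drop lo).take (hi - lo)) (-1) 0 = ws.getD (hi - 1) 0 := by
        rw [PySem.List.pyGetD_neg_one _ 0 hsubne, List.getLast_eq_getElem,
          ← List.getD_eq_getElem ((ws.drop lo).take (hi - lo)) 0
            (by omega : ((ws.drop lo).take (hi - lo)).length - 1 < ((ws.drop lo).take (hi - lo)).length),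
          hsublen]
        rw [sub_getD ws lo hi (hi - lo - 1) (by omega) hhi]
        congr 1
        omega
      have hL : ∀ k : Nat, k ≤ hi - lo →
          PySem.List.slice ((ws.drop lo).take (hi - lo)) (some 0) (some ((k : Nat) : Int)) =
          (ws.drop lo).take k := by
        intro k hk
        rw [PySem.List.slice_zero_start, PySem.List.slice_to_natCast]
        rw [List.take_take, Nat.min_eq_left hk]
      have hR : ∀ k : Nat, k ≤ hi - lo →
          PySem.List.slice ((ws.drop lo).take (hi - lo)) (some ((k : Nat) : Int)) none =
          (ws.drop (lo + k)).take (hi - (lo + k)) := by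
        intro k hk
        rw [PySem.List.slice_from_natCast, List.drop_take, List.drop_drop]
        congr 1
        omega
      have hRlen : ∀ k : Nat, lo + k ≤ hi →
          (((ws.drop (lo + k)).take (hi - (lo + k))).length : Int) = (((hi - (lo + k)) : Nat) : Int) := by
        intro k hk
        congr 1
        simp [List.length_take, List.length_drop]
        omega
      have hLlen : ∀ k : Nat, lo + k ≤ hi →
          (((ws.drop lo).take k).length : Int) = ((k : Nat) : Int) := by
        intro k hk
        congr 1
        simp [List.length_take, List.length_drop]
        omega
      by_cases heven : (hi - lo) % 2 = 0
      · -- even size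
        have hmodz : (((hi - lo) % 2 : Nat) : Int) = 0 := by exact_mod_cast heven
        have hLs : ((ws.drop lo).take ((hi - lo) / 2)).sum =
            (prefixFrom 0 ws).getD (lo + (hi - lo) / 2) 0 - (prefixFrom 0 ws).getD lo 0 :=
          prefix_range_sum ws lo ((hi - lo) / 2) (by omega)
        have hRs : ((ws.drop (lo + (hi - lo) / 2)).take (hi - (lo + (hi - lo) / 2))).sum =
            (prefixFrom 0 ws).getD hi 0 - (prefixFrom 0 ws).getD (lo + (hi - lo) / 2) 0 := by
          have h := prefix_range_sum ws (lo + (hi - lo) / 2) (hi - (lo + (hi - lo) / 2)) (by omega)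
          rw [h]
          congr 2
          omega
        simp only [recursive_helper_go, altLoop, if_neg hsz1, hfd, hmod, hmodz, compareScales,
          hL ((hi - lo) / 2) (by omega), hR ((hi - lo) / 2) (by omega), hg_mid, hg0, hglast,
          hLs, hRs, hRlen ((hi - lo) / 2) (by omega), hLlen ((hi - lo) / 2) (by omega),
          flag_lt_iff, flag_gt_iff]
        rw [if_neg (by omega : ¬ hi - lo ≤ 1), if_pos heven]
        split_ifs <;>
          first
          | omega
          | (-- descend into the right half
             have h := ih (lo + (hi - lo) / 2) hi (by omega) hhi
             rw [← h]
             congr 1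
             omega)
          | (-- descend into the left half
             have h := ih lo (lo + (hi - lo) / 2) (by omega) (by omega)
             have e : lo + (hi - lo) / 2 - lo = (hi - lo) / 2 := by omega
             rw [e] at h
             rw [← h])
      · -- odd size
        have hmodz : ¬ (((hi - lo) % 2 : Nat) : Int) = 0 := by
          intro h; exact heven (by exact_mod_cast h)
        have hmid1 : ((((hi - lo) / 2 : Nat) : Int) + 1) = (((hi - lo) / 2 + 1 : Nat) : Int) := by
          push_cast; ring
        have hLs : ((ws.drop lo).take ((hi - lo) / 2)).sum =
            (prefixFrom 0 ws).getD (lo + (hi - lo) / 2) 0 - (prefixFrom 0 ws).getD lo 0 :=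
          prefix_range_sum ws lo ((hi - lo) / 2) (by omega)
        have hRs : ((ws.drop (lo + ((hi - lo) / 2 + 1))).take (hi - (lo + ((hi - lo) / 2 + 1)))).sum =
            (prefixFrom 0 ws).getD hi 0 - (prefixFrom 0 ws).getD (lo + (hi - lo) / 2 + 1) 0 := by
          have h := prefix_range_sum ws (lo + ((hi - lo) / 2 + 1)) (hi - (lo + ((hi - lo) / 2 + 1))) (by omega)
          rw [h]
          congr 2 <;> omega
        simp only [recursive_helper_go, altLoop, if_neg hsz1, hfd, hmod, compareScales, hmid1,
          hL ((hi - lo) / 2) (by omega), hR ((hi - lo) / 2 + 1) (by omega), hg_mid, hg0,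
          hLs, hRs, hRlen ((hi - lo) / 2 + 1) (by omega), hLlen ((hi - lo) / 2) (by omega),
          flag_lt_iff, flag_gt_iff]
        rw [if_neg hmodz, if_neg (by omega : ¬ hi - lo ≤ 1), if_neg (by omega : ¬ (hi - lo) % 2 = 0)]
        split_ifs <;>
          first
          | omega
          | (-- descend into the right half
             have h := ih (lo + ((hi - lo) / 2 + 1)) hi (by omega) hhi
             have e2 : lo + (hi - lo) / 2 + 1 = lo + ((hi - lo) / 2 + 1) := by omega
             rw [e2, ← h]
             congr 1
             omega)
          | (-- descend into the left half
             have h := ih lo (lo + (hi - lo) / 2) (by omega) (by omega)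
             have e : lo + (hi - lo) / 2 - lo = (hi - lo) / 2 := by omega
             rw [e] at h
             rw [← h])

-- the loop's value does not depend on the fuel once fuel ≥ window size
theorem altLoop_fuel (ws pfx : List Int) (base : Int) :
    ∀ (f1 f2 lo hi : Nat), lo < hi → hi - lo ≤ f1 → hi - lo ≤ f2 →
      altLoop f1 ws pfx base lo hi = altLoop f2 ws pfx base lo hi := by
  intro f1
  induction f1 with
  | zero => intro f2 lo hi h h1 _; exact absurd h1 (by omega)
  | succ f ih =>
    intro f2 lo hi h h1 h2
    cases f2 with
    | zero => exact absurd h2 (by omega)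
    | succ g =>
      simp only [altLoop]
      split_ifs <;>
        first
        | rfl
        | (exact ih g _ _ (by omega) (by omega) (by omega))

-- A's recursion on a list with its true length equals Source B's _search on that list
theorem go_eq_search (sub : List Int) (base : Int) (f : Nat)
    (h1 : 1 ≤ sub.length) (hf : sub.length ≤ f) :
    recursive_helper_go f sub (sub.length : Int) base = search sub base := by
  have hb := bridge sub base f 0 sub.length h1 le_rfl
  simp only [Nat.sub_zero, List.drop_zero, List.take_length, Nat.cast_zero, add_zero] at hb
  rw [hb]
  exact altLoop_fuel sub (prefixFrom 0 sub) base f (sub.length + 1) 0 sub.length h1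
    (by omega) (by omega)

theorem slice_to_clamp {a : Type} (xs : List a) (b : Int) :
    PySem.List.slice xs none (some b) = xs.take (PySem.List.clampIdx xs.length b) := rfl

theorem clampIdx_lt_of_inRange (n : Nat) (m : Int) (h : PySem.Raise.InRange n m) :
    PySem.List.clampIdx n m < n := by
  rcases h with ⟨h1, h2⟩
  simp only [PySem.List.clampIdx]
  split_ifs <;> omega

theorem length_slice_to (xs : List Int) (b : Int) :
    (PySem.List.slice xs none (some b)).length = PySem.List.clampIdx xs.length b := by
  rw [slice_to_clamp, List.length_take, Nat.min_eq_left (PySem.List.clampIdx_le _ _)]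

theorem length_slice_from (xs : List Int) (a : Int) :
    (PySem.List.slice xs (some a) none).length = xs.length - PySem.List.clampIdx xs.length a := by
  rw [PySem.List.slice_some_none, List.length_drop]

-- ===== VERDICT (by name: the statement is the Claim_ definition above) =====
theorem recursive_helper_spec : Claim_equal_recursive_helper := by
  intro ws s i _ hpre
  unfold Spec_recursive_helper recursive_helper recursive_helper_alt
  by_cases h1 : s = 1
  · simp [recursive_helper_go, h1]
  · rcases hpre with h | ⟨hev, hin, himp⟩ | ⟨hodd, -, hRi, hLi, -⟩
    · exact absurd h h1
    · -- even first split
      have hlt := clampIdx_lt_of_inRange ws.length (PySem.Int.floordiv s 2) hin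
      have hRl := length_slice_from ws (PySem.Int.floordiv s 2)
      have hLl := length_slice_to ws (PySem.Int.floordiv s 2)
      have hLle := PySem.List.clampIdx_le ws.length (PySem.Int.floordiv s 2)
      by_cases hd : (PySem.List.pyGetD ws (PySem.Int.floordiv s 2) 0 ≠ PySem.List.pyGetD ws 0 0 ∧
          PySem.List.pyGetD ws (PySem.Int.floordiv s 2) 0 ≠ PySem.List.pyGetD ws (-1) 0)
      · simp only [recursive_helper_go, if_neg h1, if_pos hev, if_pos hd]
      · simp only [recursive_helper_go, if_neg h1, if_pos hev, if_neg hd, compareScales,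
          PySem.List.slice_zero_start, flag_lt_iff, flag_gt_iff]
        split_ifs <;>
          first
          | rfl
          | omega
          | (exact go_eq_search _ _ _ (himp hd (by omega)) (by omega))
          | (exact go_eq_search _ _ _ (by omega) (by omega))
    · -- odd first split
      have hRl := length_slice_from ws (PySem.Int.floordiv s 2 + 1)
      have hLl := length_slice_to ws (PySem.Int.floordiv s 2)
      have hLle := PySem.List.clampIdx_le ws.length (PySem.Int.floordiv s 2)
      have hRle := PySem.List.clampIdx_le ws.length (PySem.Int.floordiv s 2 + 1)
      simp only [recursive_helper_go, if_neg h1, if_neg hodd, compareScales,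
        PySem.List.slice_zero_start, flag_lt_iff, flag_gt_iff]
      split_ifs <;>
        first
        | rfl
        | omega
        | (exact go_eq_search _ _ _
            (by have := List.length_pos_of_ne_nil (hRi (by omega)); omega) (by omega))
        | (exact go_eq_search _ _ _ (hLi (by omega)) (by omega))
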